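-- pv_equiv track=rewrite | github.com/ericmerle3789/Collatz-Junction-Theorem | scripts/research/r41_occ_lite.py | compute_S
-- ===== SOURCE A (Python) =====
-- from math import comb, gcd, ceil, log2
--
-- def compute_S(k):
--     """Minimal S such that 2^S > 3^k. Exact via integer comparison."""
--     S = ceil(k * log2(3))
--     three_k = 3 ** k
--     while (1 << S) <= three_k:
--         S += 1
--     while S > 0 and (1 << (S - 1)) > three_k:
--         S -= 1
--     return S
-- ===== SOURCE B (Python) =====
-- def compute_S(k):
--     """Minimal S such that 2^S > 3^k. Exact via integer comparison."""
--     n = 3 ** k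
--     return n.bit_length()
-- ===== Notes on version B (the rewrite author's own statement) =====
-- stated objective: simpler
-- what changed: Replaces A's float-log seed plus two correcting while loops with a single closed-form read: compute the power once and return its bit_length(), which is exactly the minimal exponent sought.
import Mathlib
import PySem

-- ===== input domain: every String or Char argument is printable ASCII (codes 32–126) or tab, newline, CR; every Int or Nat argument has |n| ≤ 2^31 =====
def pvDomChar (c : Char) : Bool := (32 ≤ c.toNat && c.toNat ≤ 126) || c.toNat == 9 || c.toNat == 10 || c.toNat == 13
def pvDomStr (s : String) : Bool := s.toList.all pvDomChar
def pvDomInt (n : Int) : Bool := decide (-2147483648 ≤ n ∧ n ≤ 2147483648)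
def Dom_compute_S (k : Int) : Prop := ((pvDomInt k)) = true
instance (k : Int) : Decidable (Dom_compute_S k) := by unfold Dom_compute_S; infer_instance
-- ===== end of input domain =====

-- B replaces A's float-log seed plus two correcting while loops with one closed-form
-- read, (3**k).bit_length(); equivalence is proved for k ≥ 0 (both raise for k < 0).

-- ===== PORT A =====
-- first while loop: S += 1 while (1 << S) <= three_k
def pvUpLoop (t S : Nat) : Nat :=
  if 1 <<< S ≤ t then pvUpLoop t (S + 1) else S
termination_by t - S
decreasing_by
  have h1 : S < 2 ^ S := Nat.lt_two_pow_self
  simp only [Nat.one_shiftLeft] at *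
  omega

-- second while loop: S -= 1 while S > 0 and (1 << (S - 1)) > three_k
def pvDownLoop (t S : Nat) : Nat :=
  if S > 0 ∧ 1 <<< (S - 1) > t then pvDownLoop t (S - 1) else S
termination_by S
decreasing_by omega

def compute_S (k : Int) : Int :=
  if k < 0 then 0  -- Python raises ValueError (negative shift count); totality guard, outside Pre_
  else
    -- S = ceil(k * log2(3)); log2(3) ported as its shortest-repr double value 1.584962500721156,
    -- ceil(a/b) = -((-a) // b); the loops below make the result independent of this seed
    let seed : Int := -(PySem.Int.floordiv (-(k * 1584962500721156)) 1000000000000000)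
    let three_k : Nat := 3 ^ k.toNat
    ((pvDownLoop three_k (pvUpLoop three_k seed.toNat)) : Int)

-- ===== PORT B =====
-- hand port of int.bit_length (exact for n ≥ 0: count halvings until 0); tail-recursive
def pvBitLen (n acc : Nat) : Nat :=
  if n = 0 then acc else pvBitLen (n / 2) (acc + 1)

def compute_S_alt (k : Int) : Int :=
  let n : Int := 3 ^ k.toNat   -- 3 ** k (k ≥ 0 on Pre_; Python raises AttributeError for k < 0)
  (pvBitLen n.toNat 0 : Int)

-- ===== PRECONDITION & SPEC =====
-- For k < 0 both programs raise (A: ValueError on negative shift; B: AttributeError on float).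
def Pre_compute_S (k : Int) : Prop := 0 ≤ k
instance (k : Int) : Decidable (Pre_compute_S k) := by unfold Pre_compute_S; infer_instance
def pvWitness_compute_S : Int := (5)

def Spec_compute_S (k : Int) (out : Int) : Prop := out = compute_S_alt k
instance (k : Int) (out : Int) : Decidable (Spec_compute_S k out) := by unfold Spec_compute_S; infer_instance

-- ===== CLAIM (what is proved, stated in full; the proofs are below) =====
def Claim_equal_compute_S : Prop := ∀ (k : Int), Dom_compute_S k → Pre_compute_S k → Spec_compute_S k (compute_S k)

-- ===== LEMMAS AND PROOFS =====

lemma pvBitLen_eq (n acc : Nat) : pvBitLen n acc = PySem.Int.bitLength (n : Int) + acc := by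
  fun_induction pvBitLen n acc with
  | case1 acc => simp [PySem.Int.bitLength_zero]
  | case2 n acc h ih =>
    rw [ih, PySem.Int.bitLength_natCast (Nat.pos_of_ne_zero h)]
    omega

-- L characterises bit length of t: 2^S ≤ t ↔ S < L
lemma pvUpLoop_eq (t L S : Nat) (h : ∀ S, 2 ^ S ≤ t ↔ S < L) :
    pvUpLoop t S = max S L := by
  fun_induction pvUpLoop t S with
  | case1 S hc ih =>
    rw [Nat.one_shiftLeft] at hc
    have hSL : S < L := (h S).mp hc
    rw [ih]
    omega
  | case2 S hc =>
    rw [Nat.one_shiftLeft] at hc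
    have : ¬ S < L := fun hlt => hc ((h S).mpr hlt)
    omega

lemma pvDownLoop_eq (t L S : Nat) (h : ∀ S, 2 ^ S ≤ t ↔ S < L) (hLS : L ≤ S) :
    pvDownLoop t S = L := by
  fun_induction pvDownLoop t S with
  | case1 S hc ih =>
    obtain ⟨hS, hgt⟩ := hc
    rw [Nat.one_shiftLeft] at hgt
    have : ¬ (S - 1 < L) := fun hlt => absurd ((h (S - 1)).mpr hlt) (by omega)
    exact ih (by omega)
  | case2 S hc =>
    rw [Nat.one_shiftLeft] at hc
    by_cases hS : S = 0
    · omega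
    · have h2 : 2 ^ (S - 1) ≤ t := by
        rcases Decidable.not_and_iff_not_or_not.mp hc with h' | h' <;> omega
      have := (h (S - 1)).mp h2
      omega

lemma pvBitLen_char (t : Nat) (ht : 1 ≤ t) (S : Nat) :
    2 ^ S ≤ t ↔ S < PySem.Int.bitLength (t : Int) := by
  set L := PySem.Int.bitLength (t : Int) with hL
  have hne : (t : Int) ≠ 0 := by exact_mod_cast Nat.one_le_iff_ne_zero.mp ht
  have hlt : t < 2 ^ L := by
    have := PySem.Int.lt_two_pow_bitLength (t : Int)
    simpa [Int.natAbs_natCast] using this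
  have hge : 2 ^ (L - 1) ≤ t := by
    have := PySem.Int.two_pow_bitLength_le (t : Int) hne
    simpa [Int.natAbs_natCast] using this
  constructor
  · intro hSt
    have : 2 ^ S < 2 ^ L := lt_of_le_of_lt hSt hlt
    exact (Nat.pow_lt_pow_iff_right (by omega)).mp this
  · intro hSL
    have hSle : S ≤ L - 1 := by omega
    exact le_trans (Nat.pow_le_pow_right (by omega) hSle) hge

-- ===== VERDICT (by name: the statement is the Claim_ definition above) =====
theorem compute_S_spec : Claim_equal_compute_S := by
  intro k _ hk
  unfold Spec_compute_S compute_S compute_S_alt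
  have hnk : ¬ k < 0 := by unfold Pre_compute_S at hk; omega
  simp only [hnk, if_false]
  simp only [pvBitLen_eq]
  set t : Nat := 3 ^ k.toNat with ht
  have ht1 : 1 ≤ t := Nat.one_le_pow _ _ (by norm_num)
  have h3 : ((3 : Int) ^ k.toNat).toNat = t := by
    rw [ht]; exact_mod_cast Int.toNat_natCast ((3:Nat) ^ k.toNat)
  rw [h3]
  have hch := pvBitLen_char t ht1
  rw [pvUpLoop_eq t _ _ hch, pvDownLoop_eq t _ _ hch (le_max_right _ _)]
  simp
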